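-- pv_equiv track=rewrite | github.com/vahapunlu/FP | fugueforge/core/analyzer.py | match_interval_pattern
-- ===== SOURCE A (Python) =====
-- def match_interval_pattern(
--     haystack: list[int],
--     needle: list[int],
--     tolerance: int = 0,
-- ) -> list[int]:
--     """
--     Find all starting indices where needle matches in haystack.
--     tolerance allows minor interval deviations (e.g. tonal answer: 1 semitone).
--     """
--     matches: list[int] = []
--     if not needle or len(needle) > len(haystack):
--         return matches
--     for i in range(len(haystack) - len(needle) + 1):
--         match = True
--         for j, n_int in enumerate(needle):
--             if abs(haystack[i + j] - n_int) > tolerance: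
--                 match = False
--                 break
--         if match:
--             matches.append(i)
--     return matches
-- ===== SOURCE B (Python) =====
-- def match_interval_pattern(
--     haystack: list[int],
--     needle: list[int],
--     tolerance: int = 0,
-- ) -> list[int]:
--     if not needle or len(needle) > len(haystack):
--         return []
--     candidates = list(range(len(haystack) - len(needle) + 1))
--     for j, n_int in enumerate(needle):
--         candidates = [i for i in candidates if abs(haystack[i + j] - n_int) <= tolerance]
--     return candidates
-- ===== Notes on version B (the rewrite author's own statement) =====
-- stated objective: alternative
-- what changed: Instead of testing each start position against the whole needle with an inner break, B iterates needle-outer, maintaining one shrinking list of surviving candidate start indices that is filtered by each needle element in turn.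
import Mathlib
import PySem

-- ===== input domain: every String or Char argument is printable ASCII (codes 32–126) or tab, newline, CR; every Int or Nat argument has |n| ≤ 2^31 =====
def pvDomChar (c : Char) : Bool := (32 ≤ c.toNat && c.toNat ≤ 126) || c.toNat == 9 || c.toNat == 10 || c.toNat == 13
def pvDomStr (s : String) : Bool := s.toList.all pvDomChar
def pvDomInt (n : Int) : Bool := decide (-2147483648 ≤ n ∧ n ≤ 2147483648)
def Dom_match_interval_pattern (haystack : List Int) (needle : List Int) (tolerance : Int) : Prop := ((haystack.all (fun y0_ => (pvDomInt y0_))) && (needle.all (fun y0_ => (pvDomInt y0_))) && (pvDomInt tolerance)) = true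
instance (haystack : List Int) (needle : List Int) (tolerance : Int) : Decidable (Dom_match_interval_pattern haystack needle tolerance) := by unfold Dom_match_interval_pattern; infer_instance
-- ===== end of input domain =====

-- B replaces A's per-position inner scan (with break) by a needle-outer loop filtering one
-- shrinking list of surviving candidate start indices; same cost, different decomposition.
-- ===== PORT A =====
-- inner 'for j, n_int in enumerate(needle): if abs(...) > tolerance: match = False; break'
def pvACheck (haystack : List Int) (tolerance : Int) (i : Int) : List (Int × Int) → Bool
  | [] => true
  | (j, nv) :: rest =>
    if tolerance < |PySem.List.pyGetD haystack (i + j) 0 - nv| then false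
    else pvACheck haystack tolerance i rest

def match_interval_pattern (haystack : List Int) (needle : List Int) (tolerance : Int) : List Int :=
  if needle = [] ∨ needle.length > haystack.length then []
  else
    (PySem.List.pyRange 0 ((haystack.length : Int) - needle.length + 1) 1).foldl
      (fun acc i =>
        if pvACheck haystack tolerance i (PySem.List.enumerate needle) then acc ++ [i]
        else acc) []

-- ===== PORT B =====
def match_interval_pattern_alt (haystack : List Int) (needle : List Int) (tolerance : Int) : List Int :=
  if needle = [] ∨ needle.length > haystack.length then []
  else
    (PySem.List.enumerate needle).foldl
      (fun candidates jn =>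
        candidates.filter (fun i => |PySem.List.pyGetD haystack (i + jn.1) 0 - jn.2| ≤ tolerance))
      (PySem.List.pyRange 0 ((haystack.length : Int) - needle.length + 1) 1)

-- ===== PRECONDITION & SPEC =====
def Spec_match_interval_pattern (haystack : List Int) (needle : List Int) (tolerance : Int) (out : List Int) : Prop := out = match_interval_pattern_alt haystack needle tolerance
instance (haystack : List Int) (needle : List Int) (tolerance : Int) (out : List Int) : Decidable (Spec_match_interval_pattern haystack needle tolerance out) := by unfold Spec_match_interval_pattern; infer_instance

-- ===== CLAIM (what is proved, stated in full; the proofs are below) =====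
def Claim_equal_match_interval_pattern : Prop := ∀ (haystack : List Int) (needle : List Int) (tolerance : Int), Dom_match_interval_pattern haystack needle tolerance → Spec_match_interval_pattern haystack needle tolerance (match_interval_pattern haystack needle tolerance)

-- ===== LEMMAS AND PROOFS =====

-- ===== VERDICT (by name: the statement is the Claim_ definition above) =====
lemma pvFoldlFilter (haystack : List Int) (tolerance : Int) (pairs : List (Int × Int))
    (l : List Int) :
    pairs.foldl
      (fun candidates jn =>
        candidates.filter (fun i => |PySem.List.pyGetD haystack (i + jn.1) 0 - jn.2| ≤ tolerance)) l
      = l.filter (fun i => pvACheck haystack tolerance i pairs) := by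
  induction pairs generalizing l with
  | nil => simp [pvACheck]
  | cons p rest ih =>
    obtain ⟨j, nv⟩ := p
    rw [List.foldl_cons, ih, List.filter_filter]
    apply List.filter_congr
    intro i _
    simp only [pvACheck]
    split_ifs with h
    · simp [not_le.mpr h]
    · simp [not_lt.mp h]

theorem match_interval_pattern_spec : Claim_equal_match_interval_pattern := by
  intro haystack needle tolerance _
  unfold Spec_match_interval_pattern match_interval_pattern match_interval_pattern_alt
  split_ifs with h
  · rfl
  · rw [PySem.List.foldl_append_if_eq_filter, pvFoldlFilter, List.nil_append]
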